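-- pv_equiv track=rewrite | github.com/Jsonming/leetcode | pro_code.py | auto_turn
-- ===== SOURCE A (Python) =====
-- def auto_turn(parent_string: str):
--     process_string = parent_string.strip()
--     result = 0
--     if process_string:
--         sign = parent_string[0]
--         if sign == "-":
--             for char in parent_string[1:]:
--                 if char.isdigit():
--                     result = result * 10 + int(char)
--                 else:
--                     break
--             result = -result
--         elif sign.isdigit():
--             for char in parent_string:
--                 if char.isdigit():
--                     result = result * 10 + int(char)
--                 else:
--                     break
--         if -2 ** 32 < result < 2 ** 32 - 1:
--             pass
--         else:
--             result = 0
--     return result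
-- ===== SOURCE B (Python) =====
-- def auto_turn(parent_string: str):
--     if not parent_string.strip():
--         return 0
--     head = parent_string[0]
--     if head == '-':
--         sign, body = -1, parent_string[1:]
--     elif head.isdigit():
--         sign, body = 1, parent_string
--     else:
--         return 0
--     end = next((i for i, c in enumerate(body) if not c.isdigit()), len(body))
--     total, place = 0, 1
--     for c in reversed(body[:end]):
--         total += (ord(c) - 48) * place
--         place *= 10
--     result = sign * total
--     return result if -2 ** 32 < result < 2 ** 32 - 1 else 0
-- ===== Notes on version B (the rewrite author's own statement) =====
-- stated objective: alternative
-- what changed: Replaces A's forward break-on-non-digit Horner accumulator loop with finding the digit-run boundary first, slicing the token, and summing digit*place over the reversed token with a running place-value accumulator.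
import Mathlib
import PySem

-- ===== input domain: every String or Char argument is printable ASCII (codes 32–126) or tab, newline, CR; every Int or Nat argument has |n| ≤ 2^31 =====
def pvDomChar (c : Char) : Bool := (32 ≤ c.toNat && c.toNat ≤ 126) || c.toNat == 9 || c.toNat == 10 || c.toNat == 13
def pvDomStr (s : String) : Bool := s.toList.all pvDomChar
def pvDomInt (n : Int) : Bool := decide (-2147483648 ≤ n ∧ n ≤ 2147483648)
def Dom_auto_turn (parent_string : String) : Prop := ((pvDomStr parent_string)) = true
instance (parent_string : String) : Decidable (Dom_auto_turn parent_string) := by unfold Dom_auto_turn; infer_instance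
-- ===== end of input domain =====

-- B finds the digit-run boundary first and sums digit*place over the reversed token; alternative decomposition, same cost.

-- ===== PORT A =====
-- the for-loop over chars: break on the first non-digit, Horner accumulator; int(char) on a
-- digit char is exactly (c.toNat - 48), guarded by the isdigit branch
def autoTurnLoopA : List Char → Int → Int
  | [], result => result
  | c :: rest, result =>
      if PySem.Chars.isdigit c then autoTurnLoopA rest (result * 10 + ((c.toNat : Int) - 48))
      else result

def auto_turn (parent_string : String) : Int :=
  let cs := parent_string.toList
  if PySem.Chars.strip cs ≠ [] then
    match cs with
    | [] => 0  -- unreachable: strip nonempty forces the string nonempty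
    | sign :: _ =>
      let result : Int :=
        if sign = '-' then -(autoTurnLoopA (PySem.List.slice cs (some 1) none) 0)
        else if PySem.Chars.isdigit sign then autoTurnLoopA cs 0
        else 0
      if -(2 ^ 32) < result ∧ result < 2 ^ 32 - 1 then result else 0
  else 0

-- ===== PORT B =====
-- the reversed-token loop: state (total, place), place multiplied by 10 each step
def autoTurnLoopB : List Char → Int → Int → Int
  | [], total, _ => total
  | c :: rest, total, place => autoTurnLoopB rest (total + ((c.toNat : Int) - 48) * place) (place * 10)

def autoTurnAfterSign (sign : Int) (body : List Char) : Int :=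
  let e := body.findIdx (fun c => !PySem.Chars.isdigit c)
  let total := autoTurnLoopB (body.take e).reverse 0 1
  let result := sign * total
  if -(2 ^ 32) < result ∧ result < 2 ^ 32 - 1 then result else 0

def auto_turn_alt (parent_string : String) : Int :=
  let cs := parent_string.toList
  if PySem.Chars.strip cs = [] then 0
  else
    match cs with
    | [] => 0  -- unreachable (strip nonempty)
    | head :: _ =>
      if head = '-' then autoTurnAfterSign (-1) (PySem.List.slice cs (some 1) none)
      else if PySem.Chars.isdigit head then autoTurnAfterSign 1 cs
      else 0

-- ===== PRECONDITION & SPEC =====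
def Spec_auto_turn (parent_string : String) (out : Int) : Prop := out = auto_turn_alt parent_string
instance (parent_string : String) (out : Int) : Decidable (Spec_auto_turn parent_string out) := by unfold Spec_auto_turn; infer_instance

-- ===== CLAIM (what is proved, stated in full; the proofs are below) =====
def Claim_equal_auto_turn : Prop := ∀ (parent_string : String), Dom_auto_turn parent_string → Spec_auto_turn parent_string (auto_turn parent_string)

-- ===== LEMMAS AND PROOFS =====

-- Horner fold used as the common value of the two loops (proof-only helper)
def hornerVal (ds : List Char) (acc : Int) : Int :=
  ds.foldl (fun a c => a * 10 + ((c.toNat : Int) - 48)) acc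

theorem loopA_eq_horner (cs : List Char) (acc : Int) :
    autoTurnLoopA cs acc = hornerVal (cs.takeWhile PySem.Chars.isdigit) acc := by
  induction cs generalizing acc with
  | nil => simp [autoTurnLoopA, hornerVal]
  | cons c rest ih =>
      by_cases h : PySem.Chars.isdigit c
      · simp [autoTurnLoopA, h, hornerVal, List.foldl_cons, ih]
      · simp [autoTurnLoopA, h, hornerVal]

theorem loopB_eq_horner (rs : List Char) (total place : Int) :
    autoTurnLoopB rs total place = total + place * hornerVal rs.reverse 0 := by
  induction rs generalizing total place with
  | nil => simp [autoTurnLoopB, hornerVal]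
  | cons c rest ih =>
      have happ : hornerVal (rest.reverse ++ [c]) 0
          = hornerVal rest.reverse 0 * 10 + ((c.toNat : Int) - 48) := by
        simp [hornerVal, List.foldl_append]
      simp only [autoTurnLoopB, ih, List.reverse_cons, happ]
      ring

theorem loops_agree (body : List Char) :
    autoTurnLoopA body 0
      = autoTurnLoopB ((body.take (body.findIdx (fun c => !PySem.Chars.isdigit c))).reverse) 0 1 := by
  rw [loopB_eq_horner, List.reverse_reverse, ← List.takeWhile_eq_take_findIdx_not,
    loopA_eq_horner]
  ring

theorem after_sign_neg (body : List Char) :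
    (if -(2 ^ 32) < -(autoTurnLoopA body 0) ∧ -(autoTurnLoopA body 0) < 2 ^ 32 - 1
      then -(autoTurnLoopA body 0) else 0) = autoTurnAfterSign (-1) body := by
  simp only [autoTurnAfterSign, ← loops_agree, neg_one_mul]

theorem after_sign_pos (body : List Char) :
    (if -(2 ^ 32) < autoTurnLoopA body 0 ∧ autoTurnLoopA body 0 < 2 ^ 32 - 1
      then autoTurnLoopA body 0 else 0) = autoTurnAfterSign 1 body := by
  simp only [autoTurnAfterSign, ← loops_agree, one_mul]

-- ===== VERDICT (by name: the statement is the Claim_ definition above) =====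
theorem auto_turn_spec : Claim_equal_auto_turn := by
  intro s _
  show auto_turn s = auto_turn_alt s
  unfold auto_turn auto_turn_alt
  by_cases hstrip : PySem.Chars.strip s.toList = []
  · simp [hstrip]
  · simp only [hstrip, ne_eq, not_false_eq_true, if_true, if_false]
    cases hcs : s.toList with
    | nil => exact absurd (hcs ▸ (by decide : PySem.Chars.strip (([] : List Char)) = [])) hstrip
    | cons head rest =>
        by_cases hneg : head = '-'
        · simp only [hneg, if_true]
          exact after_sign_neg _
        · by_cases hd : PySem.Chars.isdigit head
          · simp only [hneg, hd, if_false, if_true]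
            exact after_sign_pos _
          · simp [hneg, hd]
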